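-- pv_equiv track=rewrite | github.com/iravivarm/Algorithms | max_sum_or.py | max_min_sum
-- ===== SOURCE A (Python) =====
-- def max_min_sum(arr,k):
--     max_num=0
--
--     if k <= 0:
--         return -1
--
--
--     for i in range(len(arr)):
--
--         temp = arr[:]
--         temp[i] =(temp[i])*2**k
--         temp_sum=0
--         for num in range(len(temp)):
--             temp_sum=temp_sum | temp[num]
--         if temp_sum>max_num:
--             max_num = temp_sum
--     return max_num
--
--
--     for i in range(len(arr)):
--
--         temp = arr[:]
--         temp[i] =(temp[i])*2**k
--         temp_sum=0
--         for num in range(len(temp)):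
--             temp_sum=temp_sum | temp[num]
--         if temp_sum>max_num:
--             max_num = temp_sum
--     return max_num
-- ===== SOURCE B (Python) =====
-- def max_min_sum(arr, k):
--     # prefix/suffix OR arrays: O(n) instead of A's O(n^2)
--     if k <= 0:
--         return -1
--     suf = [0]
--     for x in reversed(arr):
--         suf.append(suf[-1] | x)
--     suf.reverse()
--     best = 0
--     pre = 0
--     for x, s in zip(arr, suf[1:]):
--         cand = (pre | x * 2 ** k) | s
--         if cand > best:
--             best = cand
--         pre |= x
--     return best
-- ===== Notes on version B (the rewrite author's own statement) =====
-- stated objective: faster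
-- what changed: A rebuilds a copy of the array and re-ORs all n elements for every index (O(n^2)); B precomputes a suffix-OR array and keeps a running prefix OR, so each index's candidate is pre | (arr[i]<<k-as-product) | suf[i+1] in O(1), one linear pass overall.
import Mathlib
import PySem

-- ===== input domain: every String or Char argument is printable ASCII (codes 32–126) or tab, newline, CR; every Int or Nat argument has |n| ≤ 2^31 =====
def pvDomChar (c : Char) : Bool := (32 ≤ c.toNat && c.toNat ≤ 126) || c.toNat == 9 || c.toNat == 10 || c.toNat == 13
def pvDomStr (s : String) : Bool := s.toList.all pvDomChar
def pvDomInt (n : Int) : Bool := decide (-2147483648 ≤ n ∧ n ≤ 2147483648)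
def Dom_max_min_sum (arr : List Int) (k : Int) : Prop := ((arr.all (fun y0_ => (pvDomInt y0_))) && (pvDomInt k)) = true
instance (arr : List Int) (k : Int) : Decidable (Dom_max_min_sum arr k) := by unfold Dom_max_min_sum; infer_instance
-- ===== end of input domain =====

-- B replaces A's quadratic per-index re-OR of the whole array by prefix/suffix OR accumulators (O(n)).

-- ===== PORT A =====
-- A: for each i, copy arr, double arr[i] k times (× 2**k), OR every element, keep the max (> 0 start).
def max_min_sum (arr : List Int) (k : Int) : Int :=
  if k ≤ 0 then -1
  else
    (List.range arr.length).foldl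
      (fun max_num i =>
        -- temp = arr[:]; temp[i] = temp[i] * 2**k  (i is always in range here)
        let temp := arr.set i (arr.getD i 0 * 2 ^ k.toNat)
        let temp_sum := temp.foldl PySem.Int.bor 0
        if max_num < temp_sum then temp_sum else max_num)
      0

-- ===== PORT B =====
-- suffix OR list: suf[i] = suf[i+1] | arr[i], suf[n] = 0 (Source B builds it reversed then reverses)
def pvSuf (arr : List Int) : List Int :=
  arr.foldr (fun x s => PySem.Int.bor (s.headD 0) x :: s) [0]

def max_min_sum_alt (arr : List Int) (k : Int) : Int :=
  if k ≤ 0 then -1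
  else
    let suf := pvSuf arr
    -- single forward pass: state (pre, best), pairing arr[i] with suf[i+1]
    ((arr.zip suf.tail).foldl
      (fun pb xs =>
        let cand := PySem.Int.bor (PySem.Int.bor pb.1 (xs.1 * 2 ^ k.toNat)) xs.2
        (PySem.Int.bor pb.1 xs.1, if pb.2 < cand then cand else pb.2))
      (0, 0)).2

-- ===== PRECONDITION & SPEC =====
def Spec_max_min_sum (arr : List Int) (k : Int) (out : Int) : Prop := out = max_min_sum_alt arr k
instance (arr : List Int) (k : Int) (out : Int) : Decidable (Spec_max_min_sum arr k out) := by unfold Spec_max_min_sum; infer_instance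

-- ===== CLAIM (what is proved, stated in full; the proofs are below) =====
def Claim_equal_max_min_sum : Prop := ∀ (arr : List Int) (k : Int), Dom_max_min_sum arr k → Spec_max_min_sum arr k (max_min_sum arr k)

-- ===== LEMMAS AND PROOFS =====

-- PySem.Int.bor agrees with Mathlib's Int.lor
theorem pv_ldiff_add_and (n : Nat) : ∀ m : Nat, Nat.ldiff n m + (n &&& m) = n := by
  induction n using Nat.binaryRec with
  | zero =>
      intro m
      have h1 : Nat.ldiff 0 m = 0 := by
        apply Nat.eq_of_testBit_eq; intro i; simp [Nat.testBit_ldiff]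
      simp [h1]
  | bit b n ih =>
      intro m
      rw [← Nat.bit_bodd_div2 m]
      rw [Nat.ldiff_bit, Nat.land_bit]
      have hb : ∀ (c : Bool) (x : Nat), Nat.bit c x = 2 * x + c.toNat := by
        intro c x; cases c <;> simp [Nat.bit]
      rw [hb, hb, hb]
      have := ih (Nat.div2 m)
      cases b <;> cases Nat.bodd m <;> simp [Bool.toNat] <;> omega

theorem pv_sub_and_eq_ldiff (n m : Nat) : n - (n &&& m) = Nat.ldiff n m := by
  have h := pv_ldiff_add_and n m
  omega

theorem pv_bor_eq_lor (a b : Int) : PySem.Int.bor a b = Int.lor a b := by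
  cases a with
  | ofNat m =>
      cases b with
      | ofNat n =>
          simp [PySem.Int.bor, Int.lor]
      | negSucc n =>
          simp [PySem.Int.bor, Int.lor, Int.negSucc_eq, pv_sub_and_eq_ldiff]
          split_ifs <;> omega
  | negSucc m =>
      cases b with
      | ofNat n =>
          simp [PySem.Int.bor, Int.lor, Int.negSucc_eq, pv_sub_and_eq_ldiff]
          split_ifs <;> omega
      | negSucc n =>
          simp [PySem.Int.bor, Int.lor, Int.negSucc_eq]
          split_ifs <;> omega

theorem pv_int_eq_of_testBit_eq (a b : Int) (h : ∀ i, a.testBit i = b.testBit i) : a = b := by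
  cases a with
  | ofNat m =>
      cases b with
      | ofNat n =>
          have : m = n := by
            apply Nat.eq_of_testBit_eq; intro i
            have := h i; simpa [Int.testBit] using this
          simp [this]
      | negSucc n =>
          exfalso
          have hm : m < 2 ^ (m + n) := lt_of_lt_of_le (Nat.lt_two_pow_self) (Nat.pow_le_pow_right (by norm_num) (by omega))
          have hn : n < 2 ^ (m + n) := lt_of_lt_of_le (Nat.lt_two_pow_self) (Nat.pow_le_pow_right (by norm_num) (by omega))
          have := h (m + n)
          simp [Int.testBit, Nat.testBit_lt_two_pow hm, Nat.testBit_lt_two_pow hn] at this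
  | negSucc m =>
      cases b with
      | ofNat n =>
          exfalso
          have hm : m < 2 ^ (m + n) := lt_of_lt_of_le (Nat.lt_two_pow_self) (Nat.pow_le_pow_right (by norm_num) (by omega))
          have hn : n < 2 ^ (m + n) := lt_of_lt_of_le (Nat.lt_two_pow_self) (Nat.pow_le_pow_right (by norm_num) (by omega))
          have := h (m + n)
          simp [Int.testBit, Nat.testBit_lt_two_pow hm, Nat.testBit_lt_two_pow hn] at this
      | negSucc n =>
          have : m = n := by
            apply Nat.eq_of_testBit_eq; intro i
            have := h i; simpa [Int.testBit] using this
          simp [this]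

theorem pv_bor_assoc (a b c : Int) :
    PySem.Int.bor (PySem.Int.bor a b) c = PySem.Int.bor a (PySem.Int.bor b c) := by
  simp only [pv_bor_eq_lor]
  apply pv_int_eq_of_testBit_eq
  intro i
  simp [Int.testBit_lor, Bool.or_assoc]

-- OR of a whole list, and fold facts about it
def pvOrAll (l : List Int) : Int := l.foldl PySem.Int.bor 0

theorem pv_foldl_bor (l : List Int) : ∀ a : Int, l.foldl PySem.Int.bor a = PySem.Int.bor a (pvOrAll l) := by
  induction l with
  | nil => intro a; simp [pvOrAll, PySem.Int.bor_zero]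
  | cons x l ih =>
      intro a
      show l.foldl PySem.Int.bor (PySem.Int.bor a x) = _
      rw [ih (PySem.Int.bor a x), pv_bor_assoc]
      have : pvOrAll (x :: l) = PySem.Int.bor x (pvOrAll l) := by
        show l.foldl PySem.Int.bor (PySem.Int.bor 0 x) = _
        rw [ih (PySem.Int.bor 0 x), PySem.Int.bor_comm 0 x, PySem.Int.bor_zero]
      rw [this]

theorem pv_orAll_cons (x : Int) (l : List Int) : pvOrAll (x :: l) = PySem.Int.bor x (pvOrAll l) := by
  show l.foldl PySem.Int.bor (PySem.Int.bor 0 x) = _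
  rw [pv_foldl_bor l, PySem.Int.bor_comm 0 x, PySem.Int.bor_zero]

theorem pv_orAll_append_cons (p : List Int) (v : Int) (s : List Int) :
    pvOrAll (p ++ v :: s) = PySem.Int.bor (PySem.Int.bor (pvOrAll p) v) (pvOrAll s) := by
  show (p ++ v :: s).foldl PySem.Int.bor 0 = _
  rw [List.foldl_append]
  show s.foldl PySem.Int.bor (PySem.Int.bor (pvOrAll p) v) = _
  rw [pv_foldl_bor]

theorem pv_orAll_append_one (p : List Int) (x : Int) :
    pvOrAll (p ++ [x]) = PySem.Int.bor (pvOrAll p) x := by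
  show (p ++ [x]).foldl PySem.Int.bor 0 = _
  rw [List.foldl_append]
  rfl

-- the common reference recursion both ports are reduced to (m is the fixed multiplier 2^k)
def pvRef (m : Int) : Int → Int → List Int → Int
  | _, best, [] => best
  | pre, best, x :: l =>
      let cand := PySem.Int.bor (PySem.Int.bor pre (x * m)) (pvOrAll l)
      pvRef m (PySem.Int.bor pre x) (if best < cand then cand else best) l

-- the suffix list of B
theorem pv_suf_head (l : List Int) : (pvSuf l).headD 0 = pvOrAll l := by
  induction l with
  | nil => rfl
  | cons x l ih =>
      show (PySem.Int.bor ((pvSuf l).headD 0) x :: pvSuf l).headD 0 = _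
      simp only [List.headD_cons, ih, pv_orAll_cons, PySem.Int.bor_comm]

theorem pv_suf_eq (l : List Int) : pvSuf l = pvOrAll l :: (pvSuf l).tail := by
  cases l with
  | nil => rfl
  | cons x l =>
      show PySem.Int.bor ((pvSuf l).headD 0) x :: pvSuf l = _
      rw [pv_suf_head, pv_orAll_cons, PySem.Int.bor_comm]
      rfl

theorem pv_suf_tail_cons (x : Int) (l : List Int) : (pvSuf (x :: l)).tail = pvSuf l := rfl

-- B's fold equals pvRef
theorem pv_B_loop (m : Int) (l : List Int) : ∀ pre best : Int,
    ((l.zip (pvSuf l).tail).foldl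
      (fun pb xs =>
        let cand := PySem.Int.bor (PySem.Int.bor pb.1 (xs.1 * m)) xs.2
        (PySem.Int.bor pb.1 xs.1, if pb.2 < cand then cand else pb.2))
      (pre, best)).2 = pvRef m pre best l := by
  induction l with
  | nil => intro pre best; rfl
  | cons x l ih =>
      intro pre best
      rw [pv_suf_tail_cons, pv_suf_eq l]
      show ((l.zip (pvSuf l).tail).foldl _
        (PySem.Int.bor pre x,
          if best < PySem.Int.bor (PySem.Int.bor pre (x * m)) (pvOrAll l)
          then PySem.Int.bor (PySem.Int.bor pre (x * m)) (pvOrAll l) else best)).2 = _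
      rw [ih]
      rfl

-- A's fold over the index range equals pvRef
theorem pv_A_loop (m : Int) (s : List Int) : ∀ (p : List Int) (best : Int),
    (List.range' p.length s.length).foldl
      (fun max_num i =>
        let temp := (p ++ s).set i ((p ++ s).getD i 0 * m)
        let temp_sum := temp.foldl PySem.Int.bor 0
        if max_num < temp_sum then temp_sum else max_num)
      best = pvRef m (pvOrAll p) best s := by
  induction s with
  | nil => intro p best; simp [pvRef]
  | cons x s ih =>
      intro p best
      rw [List.length_cons, List.range'_succ, List.foldl_cons]
      have hget : (p ++ x :: s).getD p.length 0 = x := by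
        rw [List.getD_eq_getElem?_getD, List.getElem?_append_right (le_refl p.length)]
        simp
      have hset : (p ++ x :: s).set p.length (x * m) = p ++ x * m :: s := by
        rw [List.set_append]
        simp
      rw [hget, hset]
      have hsum : (p ++ x * m :: s).foldl PySem.Int.bor 0
          = PySem.Int.bor (PySem.Int.bor (pvOrAll p) (x * m)) (pvOrAll s) :=
        pv_orAll_append_cons p (x * m) s
      dsimp only
      rw [hsum]
      have harr : p ++ x :: s = (p ++ [x]) ++ s := by simp
      have hlen : p.length + 1 = (p ++ [x]).length := by simp
      rw [harr, hlen, ih (p ++ [x]), pv_orAll_append_one]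
      rfl

-- ===== VERDICT (by name: the statement is the Claim_ definition above) =====
theorem max_min_sum_spec : Claim_equal_max_min_sum := by
  intro arr k _
  show max_min_sum arr k = max_min_sum_alt arr k
  unfold max_min_sum max_min_sum_alt
  by_cases hk : k ≤ 0
  · simp [hk]
  · simp only [hk, if_false]
    rw [pv_B_loop (2 ^ k.toNat) arr 0 0]
    have h0 : (List.range arr.length) = List.range' ([] : List Int).length arr.length := by
      simp [List.range_eq_range']
    rw [h0]
    have := pv_A_loop (2 ^ k.toNat) arr [] 0
    simp only [List.nil_append] at this
    rw [this]
    rfl
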